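-- pv_equiv track=rewrite | github.com/amritdubey4/leetcode | Q194.py | transposeFile
-- ===== SOURCE A (Python) =====
-- def transposeFile(lines: list[str]) -> list[str]:
--     if not lines:
--         return []
--
--     rows = [line.split() for line in lines]
--     num_cols = len(rows[0])
--     transposed = []
--
--     for col in range(num_cols):
--         transposed.append(' '.join(row[col] for row in rows))
--
--     return transposed
-- ===== SOURCE B (Python) =====
-- def transposeFile(lines: list[str]) -> list[str]:
--     if not lines:
--         return []
--
--     rows = [line.split() for line in lines]
--
--     def go(rs, k):
--         # peel the first column off every row, recurse on the tails
--         if k == 0: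
--             return []
--         head = ' '.join(r[0] for r in rs)
--         return [head] + go([r[1:] for r in rs], k - 1)
--
--     return go(rows, len(rows[0]))
-- ===== Notes on version B (the rewrite author's own statement) =====
-- stated objective: alternative
-- what changed: Index-based column-major gather (for col in range(num_cols): join row[col] over rows) replaced by a recursive functional transpose that repeatedly peels the first element off every row and recurses on the row tails, with no column indexing at all.
import Mathlib
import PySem

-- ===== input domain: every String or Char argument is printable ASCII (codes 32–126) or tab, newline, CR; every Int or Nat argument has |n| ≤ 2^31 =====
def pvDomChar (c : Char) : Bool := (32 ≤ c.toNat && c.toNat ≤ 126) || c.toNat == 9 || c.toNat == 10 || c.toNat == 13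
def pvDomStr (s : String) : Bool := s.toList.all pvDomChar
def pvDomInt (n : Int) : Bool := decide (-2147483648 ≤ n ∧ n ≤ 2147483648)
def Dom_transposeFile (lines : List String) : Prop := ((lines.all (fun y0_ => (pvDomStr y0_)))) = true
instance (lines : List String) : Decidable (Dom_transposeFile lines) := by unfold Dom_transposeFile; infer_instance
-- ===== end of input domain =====

-- B replaces the index-based column gather by a recursive transpose that peels the
-- first element off every row and recurses on the row tails (same cost, no indexing).

-- ===== PORT A =====
-- Column-major gather: for each col in range(num_cols), join row[col] over all rows.
-- row[col] is ported as pyGetD row col ""; Pre_ excludes the ragged inputs where Python raises IndexError.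
def transposeFile (lines : List String) : List String :=
  if lines = [] then []
  else
    let rows := lines.map (fun line => PySem.Str.split₀ line)
    let numCols : Int := ((rows.headD []).length : Int)
    (PySem.List.pyRange 0 numCols 1).foldl
      (fun transposed col =>
        transposed ++ [PySem.Str.join " " (rows.map (fun row => PySem.List.pyGetD row col ""))])
      []

-- ===== PORT B =====
-- go rs k: join the first element of every row ('r[0]', ported as pyGetD r 0 ""),
-- cons it onto go applied to the row tails ('r[1:]' = slice from 1), k times.
def transposeFile_go (rs : List (List String)) : Nat → List String
  | 0 => []
  | Nat.succ k =>
      PySem.Str.join " " (rs.map (fun r => PySem.List.pyGetD r 0 "")) ::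
      transposeFile_go (rs.map (fun r => PySem.List.slice r (some 1) none)) k

def transposeFile_alt (lines : List String) : List String :=
  if lines = [] then []
  else
    let rows := lines.map (fun line => PySem.Str.split₀ line)
    transposeFile_go rows (rows.headD []).length

-- ===== PRECONDITION & SPEC =====
-- Pre_ excludes exactly the ragged inputs on which Python A raises IndexError:
-- some row has fewer whitespace-separated words than the first row.
def Pre_transposeFile (lines : List String) : Prop :=
  ∀ l ∈ lines, (PySem.Str.split₀ (lines.headD "")).length ≤ (PySem.Str.split₀ l).length
instance (lines : List String) : Decidable (Pre_transposeFile lines) := by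
  unfold Pre_transposeFile; infer_instance

def pvWitness_transposeFile : List String := ["a b c", "d e f"]

def Spec_transposeFile (lines : List String) (out : List String) : Prop := out = transposeFile_alt lines
instance (lines : List String) (out : List String) : Decidable (Spec_transposeFile lines out) := by unfold Spec_transposeFile; infer_instance

-- ===== CLAIM =====
def Claim_equal_transposeFile : Prop := ∀ (lines : List String), Dom_transposeFile lines → Pre_transposeFile lines → Spec_transposeFile lines (transposeFile lines)

-- ===== LEMMAS AND PROOFS =====

-- The recursive peel characterised column-wise: column c of the k-step peel is the
-- join of the entries at index c of every row.
theorem transposeFile_go_eq (n : Nat) (rs : List (List String)) :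
    transposeFile_go rs n =
      (List.range n).map
        (fun (c : Nat) => PySem.Str.join " " (rs.map (fun r => PySem.List.pyGetD r (c : Int) ""))) := by
  induction n generalizing rs with
  | zero => simp [transposeFile_go]
  | succ k ih =>
    simp only [transposeFile_go, ih, PySem.List.slice_from_one, List.map_map]
    rw [List.range_succ_eq_map, List.map_cons, List.map_map]
    refine congrArg₂ _ ?_ ?_
    · norm_num
    · refine List.map_congr_left fun c _ => congrArg _ (List.map_congr_left fun r _ => ?_)
      simp only [PySem.List.pyGetD_natCast, List.getD]
      simp [List.getElem?_tail]

theorem transposeFile_eq (lines : List String) :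
    transposeFile lines = transposeFile_alt lines := by
  unfold transposeFile transposeFile_alt
  by_cases h : lines = []
  · simp [h]
  · rw [if_neg h, if_neg h]
    set rows := lines.map (fun line => PySem.Str.split₀ line) with hrows
    rw [PySem.List.foldl_append_singleton_eq_map, List.nil_append,
        transposeFile_go_eq, PySem.List.pyRange_zero_natCast, List.map_map]
    rfl

-- ===== VERDICT =====
theorem transposeFile_spec : Claim_equal_transposeFile := by
  intro lines _ _
  exact transposeFile_eq lines
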